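-- pv_equiv track=rewrite | github.com/qelee7890/scoresentation | tools/nwc_to_hymns.py | map_melody_to_slides
-- ===== SOURCE A (Python) =====
-- def map_melody_to_slides(melody_notes, slide_line_counts):
--     """
--     melody_notes: [{pitch, dur, ...}, ...]
--     slide_line_counts: [[chars_line0, chars_line1], [chars_line0, ...], ...]
--     → notes 배열 (프로젝트 포맷)
--     """
--     notes_array = []
--     note_idx = 0
--
--     for slide_counts in slide_line_counts:
--         slide_notes = {}
--         for line_idx, char_count in enumerate(slide_counts):
--             line_notes = []
--             for _ in range(char_count):
--                 if note_idx < len(melody_notes):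
--                     n = melody_notes[note_idx]
--                     line_notes.append({
--                         'pitch': n['pitch'],
--                         'duration': n['dur'],
--                     })
--                 else:
--                     line_notes.append(None)
--                 note_idx += 1
--             slide_notes[str(line_idx)] = line_notes
--         notes_array.append(slide_notes)
--
--     return notes_array
-- ===== SOURCE B (Python) =====
-- def map_melody_to_slides(melody_notes, slide_line_counts):
--     # Bulk approach: pre-transform exactly the notes that will be consumed,
--     # then fill each line by slice-and-pad instead of a per-character loop.
--     total = sum(max(c, 0) for counts in slide_line_counts for c in counts)
--     mapped = [{'pitch': n['pitch'], 'duration': n['dur']} for n in melody_notes[:total]]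
--     result = []
--     idx = 0
--     for counts in slide_line_counts:
--         slide = {}
--         for line_idx, c in enumerate(counts):
--             c = max(c, 0)
--             chunk = mapped[idx:idx + c]
--             chunk += [None] * (c - len(chunk))
--             slide[str(line_idx)] = chunk
--             idx += c
--         result.append(slide)
--     return result
-- ===== Notes on version B (the rewrite author's own statement) =====
-- stated objective: simpler
-- what changed: Replaces A's per-character loop (append one transformed note or None per character, threading a mutable index through three nested loops) by one bulk pass: transform the consumed prefix of melody_notes once, then fill each line by slice-and-pad with a running offset.
import Mathlib
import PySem

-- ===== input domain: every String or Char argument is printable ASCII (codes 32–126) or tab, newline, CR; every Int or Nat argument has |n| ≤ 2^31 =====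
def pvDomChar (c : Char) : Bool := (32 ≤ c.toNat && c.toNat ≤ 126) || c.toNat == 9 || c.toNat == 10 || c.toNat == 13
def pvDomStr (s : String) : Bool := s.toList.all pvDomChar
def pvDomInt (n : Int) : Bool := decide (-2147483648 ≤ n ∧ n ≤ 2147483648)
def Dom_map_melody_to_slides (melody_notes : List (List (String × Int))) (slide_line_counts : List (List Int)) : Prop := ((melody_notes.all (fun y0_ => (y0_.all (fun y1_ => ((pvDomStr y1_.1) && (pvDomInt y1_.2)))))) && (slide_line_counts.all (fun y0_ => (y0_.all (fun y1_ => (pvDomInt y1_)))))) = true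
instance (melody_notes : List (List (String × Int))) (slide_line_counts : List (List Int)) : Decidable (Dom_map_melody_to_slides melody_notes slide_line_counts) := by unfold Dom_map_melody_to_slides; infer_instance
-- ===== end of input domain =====

-- B is a bulk slice-and-pad reformulation of A's per-character loop (objective: simpler).
-- Python dict values: each note dict is an assoc list, n['pitch'] = first match (List.lookup);
-- under Pre_ the key is present, so the port's `.getD 0` default is never taken.
-- The slide dict inserts fresh keys str(0), str(1), … into an initially empty dict, so
-- dict insertion is exactly list append: ported as an assoc-list append (exact here).

-- ===== PORT A =====
def map_melody_to_slides (melody_notes : List (List (String × Int))) (slide_line_counts : List (List Int)) : List (List (String × List (Option (List (String × Int))))) :=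
  let st := slide_line_counts.foldl
    (fun (st : List (List (String × List (Option (List (String × Int))))) × Int) slide_counts =>
      let inner := (PySem.List.enumerate slide_counts).foldl
        (fun (s : List (String × List (Option (List (String × Int)))) × Int) p =>
          let r := (PySem.List.pyRange 0 p.2 1).foldl
            (fun (q : List (Option (List (String × Int))) × Int) _ =>
              if q.2 < (melody_notes.length : Int) then
                let n := (PySem.List.pyGet? melody_notes q.2).getD []
                (q.1 ++ [some [("pitch", (n.lookup "pitch").getD 0),
                               ("duration", (n.lookup "dur").getD 0)]], q.2 + 1)
              else
                (q.1 ++ [none], q.2 + 1)) ([], s.2)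
          (s.1 ++ [(PySem.Int.toStr p.1, r.1)], r.2)) ([], st.2)
      (st.1 ++ [inner.1], inner.2)) ([], 0)
  st.1

-- ===== PORT B =====
-- helper of B: one transformed note (B's comprehension body)
def pvMkNote (n : List (String × Int)) : List (String × Int) :=
  [("pitch", (n.lookup "pitch").getD 0), ("duration", (n.lookup "dur").getD 0)]

def map_melody_to_slides_alt (melody_notes : List (List (String × Int))) (slide_line_counts : List (List Int)) : List (List (String × List (Option (List (String × Int))))) :=
  let total : Int := slide_line_counts.foldl (fun (a : Int) (counts : List Int) => counts.foldl (fun a c => a + max c 0) a) 0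
  let mapped := (PySem.List.slice melody_notes none (some total)).map pvMkNote
  let st := slide_line_counts.foldl
    (fun (st : List (List (String × List (Option (List (String × Int))))) × Int) counts =>
      let inner := (PySem.List.enumerate counts).foldl
        (fun (s : List (String × List (Option (List (String × Int)))) × Int) p =>
          let c := max p.2 0
          let chunk := (PySem.List.slice mapped (some s.2) (some (s.2 + c))).map some
          let chunk := chunk ++ List.replicate (c - (chunk.length : Int)).toNat none
          (s.1 ++ [(PySem.Int.toStr p.1, chunk)], s.2 + c)) ([], st.2)
      (st.1 ++ [inner.1], inner.2)) ([], 0)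
  st.1

-- ===== PRECONDITION & SPEC =====
-- Pre_ excludes exactly the inputs where Python A raises KeyError: some note that gets
-- consumed (index below min(len(melody_notes), total requested characters)) lacks the
-- key 'pitch' or 'dur'.  (B raises on exactly the same inputs.)
def Pre_map_melody_to_slides (melody_notes : List (List (String × Int))) (slide_line_counts : List (List Int)) : Prop :=
  (melody_notes.take (slide_line_counts.foldl (fun (a : Int) (counts : List Int) => counts.foldl (fun a c => a + max c 0) a) 0).toNat).all
    (fun n => (n.lookup "pitch").isSome && (n.lookup "dur").isSome) = true
instance (melody_notes : List (List (String × Int))) (slide_line_counts : List (List Int)) : Decidable (Pre_map_melody_to_slides melody_notes slide_line_counts) := by unfold Pre_map_melody_to_slides; infer_instance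

def pvWitness_map_melody_to_slides : (List (List (String × Int))) × List (List Int) :=
  ([[("pitch", 60), ("dur", 4)], [("pitch", 62), ("dur", 8)]], [[1, 2], [1]])

def Spec_map_melody_to_slides (melody_notes : List (List (String × Int))) (slide_line_counts : List (List Int)) (out : List (List (String × List (Option (List (String × Int)))))) : Prop := out = map_melody_to_slides_alt melody_notes slide_line_counts
instance (melody_notes : List (List (String × Int))) (slide_line_counts : List (List Int)) (out : List (List (String × List (Option (List (String × Int)))))) : Decidable (Spec_map_melody_to_slides melody_notes slide_line_counts out) := by
  unfold Spec_map_melody_to_slides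
  -- default synthesis exceeds the instance-size limit on this deeply nested type; give the term
  exact @instDecidableEqList _ (@instDecidableEqList _ (@instDecidableEqProd _ _ _ (@instDecidableEqList _ (@Option.instDecidableEq _ (@instDecidableEqList _ inferInstance))))) out _

-- ===== CLAIM (what is proved, stated in full; the proofs are below) =====
def Claim_equal_map_melody_to_slides : Prop := ∀ (melody_notes : List (List (String × Int))) (slide_line_counts : List (List Int)), Dom_map_melody_to_slides melody_notes slide_line_counts → Pre_map_melody_to_slides melody_notes slide_line_counts → Spec_map_melody_to_slides melody_notes slide_line_counts (map_melody_to_slides melody_notes slide_line_counts)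

-- ===== LEMMAS AND PROOFS =====

-- Named copies of the fold bodies of the two ports (definitionally equal to the ports' lambdas).
def pvBodyAInner (mel : List (List (String × Int))) :
    List (Option (List (String × Int))) × Int → Int → List (Option (List (String × Int))) × Int :=
  fun q _ =>
    if q.2 < (mel.length : Int) then
      let n := (PySem.List.pyGet? mel q.2).getD []
      (q.1 ++ [some [("pitch", (n.lookup "pitch").getD 0),
                     ("duration", (n.lookup "dur").getD 0)]], q.2 + 1)
    else
      (q.1 ++ [none], q.2 + 1)

def pvBodyALine (mel : List (List (String × Int))) :
    List (String × List (Option (List (String × Int)))) × Int → Int × Int →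
    List (String × List (Option (List (String × Int)))) × Int :=
  fun s p =>
    let r := (PySem.List.pyRange 0 p.2 1).foldl (pvBodyAInner mel) ([], s.2)
    (s.1 ++ [(PySem.Int.toStr p.1, r.1)], r.2)

def pvBodyASlide (mel : List (List (String × Int))) :
    List (List (String × List (Option (List (String × Int))))) × Int → List Int →
    List (List (String × List (Option (List (String × Int))))) × Int :=
  fun st slide_counts =>
    let inner := (PySem.List.enumerate slide_counts).foldl (pvBodyALine mel) ([], st.2)
    (st.1 ++ [inner.1], inner.2)

def pvBodyBLine (M : List (List (String × Int))) :
    List (String × List (Option (List (String × Int)))) × Int → Int × Int →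
    List (String × List (Option (List (String × Int)))) × Int :=
  fun s p =>
    let c := max p.2 0
    let chunk := (PySem.List.slice M (some s.2) (some (s.2 + c))).map some
    let chunk := chunk ++ List.replicate (c - (chunk.length : Int)).toNat none
    (s.1 ++ [(PySem.Int.toStr p.1, chunk)], s.2 + c)

def pvBodyBSlide (M : List (List (String × Int))) :
    List (List (String × List (Option (List (String × Int))))) × Int → List Int →
    List (List (String × List (Option (List (String × Int))))) × Int :=
  fun st counts =>
    let inner := (PySem.List.enumerate counts).foldl (pvBodyBLine M) ([], st.2)
    (st.1 ++ [inner.1], inner.2)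

/-- sum of `max c 0` over a list, as a Nat -/
def pvSumMax (l : List Int) : Nat := (l.map Int.toNat).sum

def pvSumAll (sl : List (List Int)) : Nat := (sl.map pvSumMax).sum

/-- the note (or None) the algorithm produces for global character position `k` -/
def pvNoteAt (mel : List (List (String × Int))) (k : Nat) : Option (List (String × Int)) :=
  if h : k < mel.length then some (pvMkNote mel[k]) else none

/-- canonical content of one line starting at position `i` with `m` characters -/
def pvLine (mel : List (List (String × Int))) (i m : Nat) : List (Option (List (String × Int))) :=
  (List.range m).map (fun j => pvNoteAt mel (i + j))

/-- canonical content of one slide -/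
def pvLinesCanon (mel : List (List (String × Int))) :
    List Int → Int → Nat → List (String × List (Option (List (String × Int))))
  | [], _, _ => []
  | c :: rest, s, i => (PySem.Int.toStr s, pvLine mel i c.toNat) :: pvLinesCanon mel rest (s + 1) (i + c.toNat)

/-- canonical list of slides -/
def pvSlidesCanon (mel : List (List (String × Int))) :
    List (List Int) → Nat → List (List (String × List (Option (List (String × Int)))))
  | [], _ => []
  | counts :: rest, i => pvLinesCanon mel counts 0 i :: pvSlidesCanon mel rest (i + pvSumMax counts)

lemma pvFoldMax (l : List Int) (a : Int) :
    l.foldl (fun a c => a + max c 0) a = a + (pvSumMax l : Int) := by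
  induction l generalizing a with
  | nil => simp [pvSumMax]
  | cons c t ih =>
    simp only [List.foldl_cons, ih, pvSumMax, List.map_cons, List.sum_cons]
    push_cast
    rw [Int.ofNat_toNat]
    ring

lemma pvFoldTotal (sl : List (List Int)) (a : Int) :
    sl.foldl (fun (a : Int) (counts : List Int) => counts.foldl (fun a c => a + max c 0) a) a
      = a + (pvSumAll sl : Int) := by
  induction sl generalizing a with
  | nil => simp [pvSumAll]
  | cons c t ih =>
    rw [List.foldl_cons, pvFoldMax, ih]
    simp [pvSumAll]; ring

lemma pvLine_succ (mel : List (List (String × Int))) (i m : Nat) :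
    pvLine mel i (m + 1) = pvNoteAt mel i :: pvLine mel (i + 1) m := by
  simp only [pvLine, List.range_succ_eq_map, List.map_cons, List.map_map, Nat.add_zero]
  refine congrArg _ (List.map_congr_left fun j _ => ?_)
  simp only [Function.comp_apply]
  congr 1
  omega

/-- A's innermost per-character loop -/
lemma pvA_inner (mel : List (List (String × Int))) (L : List Int)
    (l0 : List (Option (List (String × Int)))) (i : Int) (hi : 0 ≤ i) :
    L.foldl (pvBodyAInner mel) (l0, i)
      = (l0 ++ pvLine mel i.toNat L.length, i + (L.length : Int)) := by
  induction L generalizing l0 i with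
  | nil => simp [pvLine]
  | cons c t ih =>
    simp only [List.foldl_cons, List.length_cons]
    have hstep : pvBodyAInner mel (l0, i) c = (l0 ++ [pvNoteAt mel i.toNat], i + 1) := by
      by_cases h : i < (mel.length : Int)
      · have hlt : i.toNat < mel.length := by omega
        have hget : PySem.List.pyGet? mel i = some (mel[i.toNat]'hlt) := by
          rw [PySem.List.pyGet?_of_nonneg mel hi]
          exact List.getElem?_eq_getElem hlt
        simp [pvBodyAInner, h, hget, pvNoteAt, hlt, pvMkNote]
      · have hge : ¬ i.toNat < mel.length := by omega
        simp [pvBodyAInner, h, pvNoteAt, hge]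
    rw [hstep, ih _ _ (by omega)]
    have h1 : (i + 1).toNat = i.toNat + 1 := by omega
    rw [h1, pvLine_succ]
    refine Prod.ext ?_ ?_
    · simp
    · simp; ring

/-- B's slice-and-pad chunk equals the canonical line, as long as the line lies inside the
    precomputed prefix (`i + m ≤ T`). -/
lemma pvChunk (mel : List (List (String × Int))) (T i m : Nat) (h : i + m ≤ T) :
    ((PySem.List.slice ((mel.take T).map pvMkNote) (some (i : Int)) (some ((i : Int) + (m : Int)))).map some)
      ++ List.replicate ((m : Int) - (((PySem.List.slice ((mel.take T).map pvMkNote) (some (i : Int)) (some ((i : Int) + (m : Int)))).map some).length : Int)).toNat none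
      = pvLine mel i m := by
  rw [PySem.List.slice_natCast_add]
  set M := (mel.take T).map pvMkNote with hM
  have hMlen : M.length = min T mel.length := by simp [hM]
  apply List.ext_getElem
  · simp [pvLine]; omega
  · intro j hj1 hj2
    have hjm : j < m := by
      simp only [List.length_append, List.length_map, List.length_take, List.length_drop,
        List.length_replicate] at hj1
      omega
    have hR : (pvLine mel i m)[j]'(by simpa [pvLine] using hjm) = pvNoteAt mel (i + j) := by
      simp [pvLine]
    rw [hR]
    by_cases hin : j < min m (M.length - i)
    · rw [List.getElem_append_left (by simp only [List.length_map, List.length_take, List.length_drop]; omega)]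
      have hiT : i + j < T := by omega
      have hiM : i + j < M.length := by omega
      have himel : i + j < mel.length := by omega
      simp only [List.getElem_map, List.getElem_take, List.getElem_drop]
      rw [pvNoteAt, dif_pos himel]
      congr 1
      simp only [hM, List.getElem_map, List.getElem_take]
    · rw [List.getElem_append_right (by simp only [List.length_map, List.length_take, List.length_drop]; omega)]
      simp only [List.getElem_replicate]
      have : ¬ i + j < mel.length := by omega
      rw [pvNoteAt, dif_neg this]

/-- A's per-line loop, closed form. -/
lemma pvA_lines (mel : List (List (String × Int))) (counts : List Int) (s : Int)
    (acc : List (String × List (Option (List (String × Int))))) (i : Int) (hi : 0 ≤ i) :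
    (PySem.List.enumerate counts s).foldl (pvBodyALine mel) (acc, i)
      = (acc ++ pvLinesCanon mel counts s i.toNat, i + (pvSumMax counts : Int)) := by
  induction counts generalizing s acc i with
  | nil => simp [PySem.List.enumerate_nil, pvLinesCanon, pvSumMax]
  | cons c t ih =>
    rw [PySem.List.enumerate_cons, List.foldl_cons]
    have hstep : pvBodyALine mel (acc, i) (s, c)
        = (acc ++ [(PySem.Int.toStr s, pvLine mel i.toNat c.toNat)], i + (c.toNat : Int)) := by
      show (acc ++ [(PySem.Int.toStr s, ((PySem.List.pyRange 0 c 1).foldl (pvBodyAInner mel) ([], i)).1)],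
            ((PySem.List.pyRange 0 c 1).foldl (pvBodyAInner mel) ([], i)).2) = _
      rw [pvA_inner mel _ _ _ hi]
      simp [PySem.List.length_pyRange_one]
    rw [hstep, ih _ _ _ (by omega)]
    have h1 : (i + (c.toNat : Int)).toNat = i.toNat + c.toNat := by omega
    rw [h1]
    refine Prod.ext ?_ ?_
    · simp [pvLinesCanon]
    · simp [pvSumMax]; ring

/-- B's per-line loop, closed form (needs the prefix bound). -/
lemma pvB_lines (mel : List (List (String × Int))) (T : Nat) (counts : List Int) (s : Int)
    (acc : List (String × List (Option (List (String × Int))))) (i : Int) (hi : 0 ≤ i)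
    (hb : i.toNat + pvSumMax counts ≤ T) :
    (PySem.List.enumerate counts s).foldl (pvBodyBLine ((mel.take T).map pvMkNote)) (acc, i)
      = (acc ++ pvLinesCanon mel counts s i.toNat, i + (pvSumMax counts : Int)) := by
  induction counts generalizing s acc i with
  | nil => simp [PySem.List.enumerate_nil, pvLinesCanon, pvSumMax]
  | cons c t ih =>
    rw [PySem.List.enumerate_cons, List.foldl_cons]
    have hcast : (i : Int) = ((i.toNat : Nat) : Int) := by omega
    have hmax : max c 0 = ((c.toNat : Nat) : Int) := by omega
    have hstep : pvBodyBLine ((mel.take T).map pvMkNote) (acc, i) (s, c)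
        = (acc ++ [(PySem.Int.toStr s, pvLine mel i.toNat c.toNat)], i + (c.toNat : Int)) := by
      show (acc ++ [(PySem.Int.toStr s,
          ((PySem.List.slice ((mel.take T).map pvMkNote) (some i) (some (i + max c 0))).map some)
            ++ List.replicate ((max c 0 - ((((PySem.List.slice ((mel.take T).map pvMkNote) (some i) (some (i + max c 0))).map some).length : Int))).toNat) none)],
          i + max c 0) = _
      rw [hmax, hcast, pvChunk mel T i.toNat c.toNat (by simp [pvSumMax] at hb; omega)]
      simp [show max i 0 = i from by omega]
    rw [hstep, ih _ _ _ (by omega) (by simp [pvSumMax] at hb ⊢; omega)]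
    have h1 : (i + (c.toNat : Int)).toNat = i.toNat + c.toNat := by omega
    rw [h1]
    refine Prod.ext ?_ ?_
    · simp [pvLinesCanon]
    · simp [pvSumMax]; ring

/-- A's outer loop, closed form. -/
lemma pvA_slides (mel : List (List (String × Int))) (SL : List (List Int))
    (acc : List (List (String × List (Option (List (String × Int)))))) (i : Int) (hi : 0 ≤ i) :
    SL.foldl (pvBodyASlide mel) (acc, i)
      = (acc ++ pvSlidesCanon mel SL i.toNat, i + (pvSumAll SL : Int)) := by
  induction SL generalizing acc i with
  | nil => simp [pvSlidesCanon, pvSumAll]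
  | cons counts t ih =>
    rw [List.foldl_cons]
    have hstep : pvBodyASlide mel (acc, i) counts
        = (acc ++ [pvLinesCanon mel counts 0 i.toNat], i + (pvSumMax counts : Int)) := by
      show (acc ++ [((PySem.List.enumerate counts).foldl (pvBodyALine mel) ([], i)).1],
            ((PySem.List.enumerate counts).foldl (pvBodyALine mel) ([], i)).2) = _
      rw [pvA_lines mel counts 0 [] i hi]
      simp
    rw [hstep, ih _ _ (by omega)]
    have h1 : (i + (pvSumMax counts : Int)).toNat = i.toNat + pvSumMax counts := by omega
    rw [h1]
    refine Prod.ext ?_ ?_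
    · simp [pvSlidesCanon]
    · simp [pvSumAll]; ring

/-- B's outer loop, closed form. -/
lemma pvB_slides (mel : List (List (String × Int))) (T : Nat) (SL : List (List Int))
    (acc : List (List (String × List (Option (List (String × Int)))))) (i : Int) (hi : 0 ≤ i)
    (hb : i.toNat + pvSumAll SL ≤ T) :
    SL.foldl (pvBodyBSlide ((mel.take T).map pvMkNote)) (acc, i)
      = (acc ++ pvSlidesCanon mel SL i.toNat, i + (pvSumAll SL : Int)) := by
  induction SL generalizing acc i with
  | nil => simp [pvSlidesCanon, pvSumAll]
  | cons counts t ih =>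
    rw [List.foldl_cons]
    have hstep : pvBodyBSlide ((mel.take T).map pvMkNote) (acc, i) counts
        = (acc ++ [pvLinesCanon mel counts 0 i.toNat], i + (pvSumMax counts : Int)) := by
      show (acc ++ [((PySem.List.enumerate counts).foldl (pvBodyBLine ((mel.take T).map pvMkNote)) ([], i)).1],
            ((PySem.List.enumerate counts).foldl (pvBodyBLine ((mel.take T).map pvMkNote)) ([], i)).2) = _
      rw [pvB_lines mel T counts 0 [] i hi (by simp [pvSumAll] at hb; omega)]
      simp
    rw [hstep, ih _ _ (by omega) (by simp [pvSumAll] at hb ⊢; omega)]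
    have h1 : (i + (pvSumMax counts : Int)).toNat = i.toNat + pvSumMax counts := by omega
    rw [h1]
    refine Prod.ext ?_ ?_
    · simp [pvSlidesCanon]
    · simp [pvSumAll]; ring

/-- The two ports agree on every input. -/
lemma pvPortsEq (mel : List (List (String × Int))) (SL : List (List Int)) :
    map_melody_to_slides mel SL = map_melody_to_slides_alt mel SL := by
  show (SL.foldl (pvBodyASlide mel) ([], 0)).1
      = (SL.foldl (pvBodyBSlide ((PySem.List.slice mel none
          (some (SL.foldl (fun (a : Int) (counts : List Int) => counts.foldl (fun a c => a + max c 0) a) 0))).map pvMkNote)) ([], 0)).1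
  rw [pvFoldTotal]
  have hslice : PySem.List.slice mel none (some ((0 : Int) + (pvSumAll SL : Int)))
      = mel.take (pvSumAll SL) := by
    rw [show (0 : Int) + (pvSumAll SL : Int) = ((pvSumAll SL : Nat) : Int) by ring]
    exact PySem.List.slice_to_natCast mel (pvSumAll SL)
  rw [hslice]
  rw [pvA_slides mel SL [] 0 le_rfl, pvB_slides mel (pvSumAll SL) SL [] 0 le_rfl (by simp)]

-- ===== VERDICT (by name: the statement is the Claim_ definition above) =====
theorem map_melody_to_slides_spec : Claim_equal_map_melody_to_slides := by
  intro mel SL _ _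
  unfold Spec_map_melody_to_slides
  exact pvPortsEq mel SL
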